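-- pv_equiv track=rewrite | github.com/terrynjung181/CrosswordCreator | layout_solver/analyze_layout.py | check_legal_layout
-- ===== SOURCE A (Python) =====
-- def check_legal_layout(layout):
--     num_rows, num_cols = len(layout), len(layout[0])
--
--     found_something = False
--     for i in range(num_rows):
--         for j in range(num_cols):
--             if layout[i][j] == 1:
--                 found_something = True
--                 is_left = False
--                 is_right = False
--                 is_up = False
--                 is_down = False
--                 if i > 0:
--                     is_left = layout[i-1][j] == 1
--                 if i < num_rows - 1:
--                     is_right = layout[i+1][j] == 1
--                 if j > 0:
--                     is_up = layout[i][j-1] == 1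
--                 if j < num_cols - 1:
--                     is_down = layout[i][j+1] == 1
--
--                 if not(is_left or is_right or is_up or is_down):
--                     return False
--
--     return found_something
-- ===== SOURCE B (Python) =====
-- def check_legal_layout(layout):
--     num_rows, num_cols = len(layout), len(layout[0])
--
--     connected = set()
--     found = False
--     for i in range(num_rows):
--         for j in range(num_cols):
--             if layout[i][j] == 1:
--                 found = True
--                 if j + 1 < num_cols and layout[i][j + 1] == 1:
--                     connected.add((i, j))
--                     connected.add((i, j + 1))
--                 if i + 1 < num_rows and layout[i + 1][j] == 1:
--                     connected.add((i, j))
--                     connected.add((i + 1, j))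
--     if not found:
--         return False
--     return all(layout[i][j] != 1 or (i, j) in connected
--                for i in range(num_rows) for j in range(num_cols))
-- ===== Notes on version B (the rewrite author's own statement) =====
-- stated objective: alternative
-- what changed: Instead of A's per-cell four-direction neighbor probe with early return, B makes one pass that inspects only right/down adjacent pairs and records both endpoints of every adjacent filled pair in a 'connected' set, then a second pass checks that some filled cell exists and every filled cell is in the set.
-- outside the precondition, e.g. on check_legal_layout([[1, 0], [0]]): A returns False, B raises IndexError
import Mathlib
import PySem

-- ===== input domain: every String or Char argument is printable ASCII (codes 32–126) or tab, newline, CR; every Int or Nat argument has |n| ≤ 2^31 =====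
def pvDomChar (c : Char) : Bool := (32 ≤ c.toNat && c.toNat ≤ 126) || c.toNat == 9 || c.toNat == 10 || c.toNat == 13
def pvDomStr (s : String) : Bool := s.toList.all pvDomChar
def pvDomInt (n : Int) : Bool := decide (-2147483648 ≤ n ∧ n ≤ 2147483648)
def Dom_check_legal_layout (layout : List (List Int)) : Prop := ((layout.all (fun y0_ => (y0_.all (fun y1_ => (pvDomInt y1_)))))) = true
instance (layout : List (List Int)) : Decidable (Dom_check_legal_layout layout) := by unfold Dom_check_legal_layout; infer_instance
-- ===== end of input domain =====

-- B replaces A's per-cell four-direction probe (with early return) by a two-phase pass: mark both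
-- endpoints of every right/down adjacent filled pair in a set, then validate every filled cell is marked.


-- shared one-line cell accessor: layout[i][j] (total; Pre_ keeps every access in range)
def pvCell (layout : List (List Int)) (i j : Int) : Int :=
  PySem.List.pyGetD (PySem.List.pyGetD layout i []) j 0

-- ===== PORT A =====
-- inner 'for j' loop; 'none' = the Python's 'return False', 'some f' = fall through with found-flag f
def aInner (layout : List (List Int)) (nr nc i : Int) : List Int → Bool → Option Bool
  | [], found => some found
  | j :: js, found =>
    if pvCell layout i j == 1 then
      let is_left  := if i > 0 then pvCell layout (i-1) j == 1 else false
      let is_right := if i < nr - 1 then pvCell layout (i+1) j == 1 else false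
      let is_up    := if j > 0 then pvCell layout i (j-1) == 1 else false
      let is_down  := if j < nc - 1 then pvCell layout i (j+1) == 1 else false
      if !(is_left || is_right || is_up || is_down) then none
      else aInner layout nr nc i js true
    else aInner layout nr nc i js found

-- outer 'for i' loop
def aOuter (layout : List (List Int)) (nr nc : Int) : List Int → Bool → Option Bool
  | [], found => some found
  | i :: is, found =>
    match aInner layout nr nc i (PySem.List.pyRange 0 nc 1) found with
    | none => none
    | some f => aOuter layout nr nc is f

def check_legal_layout (layout : List (List Int)) : Bool :=
  let nr : Int := layout.length
  let nc : Int := (PySem.List.pyGetD layout 0 []).length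
  match aOuter layout nr nc (PySem.List.pyRange 0 nr 1) false with
  | none => false
  | some f => f

-- ===== PORT B =====
-- phase 1, inner loop: record both endpoints of each right/down adjacent filled pair
def bRow (layout : List (List Int)) (nr nc i : Int) :
    List Int → PySem.Set (Int × Int) × Bool → PySem.Set (Int × Int) × Bool
  | [], st => st
  | j :: js, (conn, found) =>
    if pvCell layout i j == 1 then
      let conn1 := if decide (j + 1 < nc) && (pvCell layout i (j+1) == 1)
                   then PySem.Set.add (PySem.Set.add conn (i, j)) (i, j+1) else conn
      let conn2 := if decide (i + 1 < nr) && (pvCell layout (i+1) j == 1)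
                   then PySem.Set.add (PySem.Set.add conn1 (i, j)) (i+1, j) else conn1
      bRow layout nr nc i js (conn2, true)
    else bRow layout nr nc i js (conn, found)

-- phase 1, outer loop
def bGrid (layout : List (List Int)) (nr nc : Int) :
    List Int → PySem.Set (Int × Int) × Bool → PySem.Set (Int × Int) × Bool
  | [], st => st
  | i :: is, st => bGrid layout nr nc is (bRow layout nr nc i (PySem.List.pyRange 0 nc 1) st)

def check_legal_layout_alt (layout : List (List Int)) : Bool :=
  let nr : Int := layout.length
  let nc : Int := (PySem.List.pyGetD layout 0 []).length
  let st := bGrid layout nr nc (PySem.List.pyRange 0 nr 1) (PySem.Set.empty, false)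
  if !st.2 then false
  else (PySem.List.pyRange 0 nr 1).all (fun i =>
         (PySem.List.pyRange 0 nc 1).all (fun j =>
           (pvCell layout i j != 1) || PySem.Set.contains st.1 (i, j)))

-- ===== PRECONDITION & SPEC =====
-- Python A raises IndexError on the empty layout and (almost always) on ragged layouts whose later
-- rows are shorter than row 0; Pre_ excludes all ragged layouts, which also drops the rare ragged
-- inputs where A happens to return False via its early return before touching a short row.
def Pre_check_legal_layout (layout : List (List Int)) : Prop :=
  layout ≠ [] ∧ ∀ row ∈ layout, (layout.headI).length ≤ row.length
instance (layout : List (List Int)) : Decidable (Pre_check_legal_layout layout) := by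
  unfold Pre_check_legal_layout; infer_instance
def pvWitness_check_legal_layout : List (List Int) := [[1, 1], [0, 1]]

def Spec_check_legal_layout (layout : List (List Int)) (out : Bool) : Prop := out = check_legal_layout_alt layout
instance (layout : List (List Int)) (out : Bool) : Decidable (Spec_check_legal_layout layout out) := by unfold Spec_check_legal_layout; infer_instance

-- ===== CLAIM (what is proved, stated in full; the proofs are below) =====
def Claim_equal_check_legal_layout : Prop := ∀ (layout : List (List Int)), Dom_check_legal_layout layout → Pre_check_legal_layout layout → Spec_check_legal_layout layout (check_legal_layout layout)

-- ===== LEMMAS AND PROOFS =====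

-- the specification pieces both ports are reduced to
def pvNbr (L : List (List Int)) (nr nc i j : Int) : Bool :=
  (decide (i > 0) && (pvCell L (i-1) j == 1)) ||
  (decide (i < nr - 1) && (pvCell L (i+1) j == 1)) ||
  (decide (j > 0) && (pvCell L i (j-1) == 1)) ||
  (decide (j < nc - 1) && (pvCell L i (j+1) == 1))

def pvRowAll (L : List (List Int)) (nr nc i : Int) : Bool :=
  (PySem.List.pyRange 0 nc 1).all (fun j => !(pvCell L i j == 1) || pvNbr L nr nc i j)

def pvRowAny (L : List (List Int)) (nc i : Int) : Bool :=
  (PySem.List.pyRange 0 nc 1).any (fun j => pvCell L i j == 1)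

-- which coordinates x the bRow step at (i,j) may add
def pvAddCond (L : List (List Int)) (nr nc i j : Int) (x : Int × Int) : Prop :=
  pvCell L i j = 1 ∧
  ((j + 1 < nc ∧ pvCell L i (j+1) = 1 ∧ (x = (i, j) ∨ x = (i, j+1))) ∨
   (i + 1 < nr ∧ pvCell L (i+1) j = 1 ∧ (x = (i, j) ∨ x = (i+1, j))))

theorem pv_if_bool (c : Prop) [Decidable c] (b : Bool) :
    (if c then b else false) = (decide c && b) := by
  split_ifs with h <;> simp [h]

theorem aInner_eq (L : List (List Int)) (nr nc i : Int) (js : List Int) :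
    ∀ found, aInner L nr nc i js found =
      if js.all (fun j => !(pvCell L i j == 1) || pvNbr L nr nc i j)
      then some (found || js.any (fun j => pvCell L i j == 1)) else none := by
  induction js with
  | nil => intro found; simp [aInner]
  | cons j js ih =>
    intro found
    simp only [aInner, List.all_cons, List.any_cons]
    by_cases h1 : (pvCell L i j == 1) = true
    · have hfl : ((if i > 0 then pvCell L (i-1) j == 1 else false) ||
          (if i < nr - 1 then pvCell L (i+1) j == 1 else false) ||
          (if j > 0 then pvCell L i (j-1) == 1 else false) ||
          (if j < nc - 1 then pvCell L i (j+1) == 1 else false)) = pvNbr L nr nc i j := by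
        simp only [pv_if_bool, pvNbr]
      simp only [h1, if_true]
      rw [hfl]
      by_cases hn : pvNbr L nr nc i j = true
      · simp [hn, ih]
      · simp only [Bool.not_eq_true] at hn
        simp [hn]
    · simp only [Bool.not_eq_true] at h1
      simp [h1, ih]

theorem aOuter_eq (L : List (List Int)) (nr nc : Int) (is : List Int) :
    ∀ found, aOuter L nr nc is found =
      if is.all (fun i => pvRowAll L nr nc i)
      then some (found || is.any (fun i => pvRowAny L nc i)) else none := by
  induction is with
  | nil => intro found; simp [aOuter]
  | cons i is ih =>
    intro found
    simp only [aOuter, List.all_cons, List.any_cons]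
    rw [aInner_eq]
    by_cases hr : pvRowAll L nr nc i = true
    · have hr' := hr; simp only [pvRowAll] at hr'
      rw [if_pos hr']
      show aOuter L nr nc is _ = _
      rw [ih]
      simp only [hr, Bool.true_and, pvRowAny, Bool.or_assoc]
    · have hrf : pvRowAll L nr nc i = false := by
        simpa [Bool.not_eq_true] using hr
      have hr' : ¬ ((PySem.List.pyRange 0 nc 1).all
          (fun j => !(pvCell L i j == 1) || pvNbr L nr nc i j)) = true := by
        simpa [pvRowAll] using hr
      rw [if_neg hr']
      simp [hrf]

theorem a_char (L : List (List Int)) :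
    check_legal_layout L =
      ((PySem.List.pyRange 0 (L.length : Int) 1).all
          (fun i => pvRowAll L (L.length : Int) ((PySem.List.pyGetD L 0 []).length : Int) i) &&
       (PySem.List.pyRange 0 (L.length : Int) 1).any
          (fun i => pvRowAny L ((PySem.List.pyGetD L 0 []).length : Int) i)) := by
  simp only [check_legal_layout]
  rw [aOuter_eq]
  by_cases h : (PySem.List.pyRange 0 (L.length : Int) 1).all
      (fun i => pvRowAll L (L.length : Int) ((PySem.List.pyGetD L 0 []).length : Int) i) = true <;>
    simp [h]

theorem bRow_snd (L : List (List Int)) (nr nc i : Int) (js : List Int) :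
    ∀ conn found, (bRow L nr nc i js (conn, found)).2 =
      (found || js.any (fun j => pvCell L i j == 1)) := by
  induction js with
  | nil => intro conn found; simp [bRow]
  | cons j js ih =>
    intro conn found
    simp only [bRow, List.any_cons]
    by_cases h1 : (pvCell L i j == 1) = true
    · simp [h1, ih]
    · simp only [Bool.not_eq_true] at h1
      simp [h1, ih]

theorem mem_add_pair {α : Type} [BEq α] [LawfulBEq α] (s : PySem.Set α) (a b x : α) :
    x ∈ PySem.Set.add (PySem.Set.add s a) b ↔ x ∈ s ∨ x = a ∨ x = b := by
  simp [PySem.Set.mem_add]; tauto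

set_option maxHeartbeats 1000000 in
theorem bRow_mem (L : List (List Int)) (nr nc i : Int) (js : List Int) :
    ∀ conn found (x : Int × Int), (x ∈ (bRow L nr nc i js (conn, found)).1 ↔
      x ∈ conn ∨ ∃ j ∈ js, pvAddCond L nr nc i j x) := by
  induction js with
  | nil => intro conn found x; simp [bRow]
  | cons j js ih =>
    intro conn found x
    simp only [bRow]
    by_cases h1 : (pvCell L i j == 1) = true
    · have h1' : pvCell L i j = 1 := by simpa using h1
      simp only [h1, if_true]
      rw [List.exists_mem_cons_iff]
      by_cases c1 : (decide (j + 1 < nc) && (pvCell L i (j+1) == 1)) = true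
      · have hc1 : j + 1 < nc ∧ pvCell L i (j+1) = 1 := by simpa using c1
        by_cases c2 : (decide (i + 1 < nr) && (pvCell L (i+1) j == 1)) = true
        · have hc2 : i + 1 < nr ∧ pvCell L (i+1) j = 1 := by simpa using c2
          have hhead : pvAddCond L nr nc i j x ↔
              ((x = (i, j) ∨ x = (i, j + 1)) ∨ (x = (i, j) ∨ x = (i + 1, j))) := by
            constructor
            · rintro ⟨_, ⟨_, _, hx⟩ | ⟨_, _, hx⟩⟩
              · exact Or.inl hx
              · exact Or.inr hx
            · rintro (hx | hx)
              · exact ⟨h1', Or.inl ⟨hc1.1, hc1.2, hx⟩⟩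
              · exact ⟨h1', Or.inr ⟨hc2.1, hc2.2, hx⟩⟩
          rw [if_pos c1, if_pos c2, ih, hhead]
          simp only [mem_add_pair]
          tauto
        · have hc2 : ¬ (i + 1 < nr ∧ pvCell L (i+1) j = 1) := by simpa using c2
          have hhead : pvAddCond L nr nc i j x ↔ (x = (i, j) ∨ x = (i, j + 1)) := by
            constructor
            · rintro ⟨_, ⟨_, _, hx⟩ | ⟨hb, hn, _⟩⟩
              · exact hx
              · exact absurd ⟨hb, hn⟩ hc2
            · intro hx
              exact ⟨h1', Or.inl ⟨hc1.1, hc1.2, hx⟩⟩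
          rw [if_pos c1, if_neg c2, ih, hhead]
          simp only [mem_add_pair]
          tauto
      · have hc1 : ¬ (j + 1 < nc ∧ pvCell L i (j+1) = 1) := by simpa using c1
        by_cases c2 : (decide (i + 1 < nr) && (pvCell L (i+1) j == 1)) = true
        · have hc2 : i + 1 < nr ∧ pvCell L (i+1) j = 1 := by simpa using c2
          have hhead : pvAddCond L nr nc i j x ↔ (x = (i, j) ∨ x = (i + 1, j)) := by
            constructor
            · rintro ⟨_, ⟨hb, hn, _⟩ | ⟨_, _, hx⟩⟩
              · exact absurd ⟨hb, hn⟩ hc1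
              · exact hx
            · intro hx
              exact ⟨h1', Or.inr ⟨hc2.1, hc2.2, hx⟩⟩
          rw [if_neg c1, if_pos c2, ih, hhead]
          simp only [mem_add_pair]
          tauto
        · have hc2 : ¬ (i + 1 < nr ∧ pvCell L (i+1) j = 1) := by simpa using c2
          have hhead : pvAddCond L nr nc i j x ↔ False := by
            constructor
            · rintro ⟨_, ⟨hb, hn, _⟩ | ⟨hb, hn, _⟩⟩
              · exact absurd ⟨hb, hn⟩ hc1
              · exact absurd ⟨hb, hn⟩ hc2
            · exact False.elim
          rw [if_neg c1, if_neg c2, ih, hhead]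
          tauto
    · have h1' : ¬ pvCell L i j = 1 := by simpa using h1
      simp only [Bool.not_eq_true] at h1
      simp only [h1, Bool.false_eq_true, if_false]
      rw [ih, List.exists_mem_cons_iff]
      have hhead : pvAddCond L nr nc i j x ↔ False :=
        ⟨fun h => h1' h.1, False.elim⟩
      rw [hhead]
      tauto

theorem bGrid_snd (L : List (List Int)) (nr nc : Int) (is : List Int) :
    ∀ conn found, (bGrid L nr nc is (conn, found)).2 =
      (found || is.any (fun i => pvRowAny L nc i)) := by
  induction is with
  | nil => intro conn found; simp [bGrid]
  | cons i is ih =>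
    intro conn found
    simp only [bGrid, List.any_cons]
    have hp : bRow L nr nc i (PySem.List.pyRange 0 nc 1) (conn, found) =
        ((bRow L nr nc i (PySem.List.pyRange 0 nc 1) (conn, found)).1,
         (bRow L nr nc i (PySem.List.pyRange 0 nc 1) (conn, found)).2) := rfl
    rw [hp, ih, bRow_snd]
    simp [pvRowAny, Bool.or_assoc]

theorem bGrid_mem (L : List (List Int)) (nr nc : Int) (is : List Int) :
    ∀ conn found (x : Int × Int), (x ∈ (bGrid L nr nc is (conn, found)).1 ↔
      x ∈ conn ∨ ∃ i ∈ is, ∃ j ∈ PySem.List.pyRange 0 nc 1, pvAddCond L nr nc i j x) := by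
  induction is with
  | nil => intro conn found x; simp [bGrid]
  | cons i is ih =>
    intro conn found x
    simp only [bGrid]
    have hp : bRow L nr nc i (PySem.List.pyRange 0 nc 1) (conn, found) =
        ((bRow L nr nc i (PySem.List.pyRange 0 nc 1) (conn, found)).1,
         (bRow L nr nc i (PySem.List.pyRange 0 nc 1) (conn, found)).2) := rfl
    rw [hp, ih, bRow_mem, List.exists_mem_cons_iff]
    exact or_assoc

-- the marked set is exactly: in-range, filled, and with a filled 4-neighbor
theorem conn_char (L : List (List Int)) (nr nc : Int) (x : Int × Int) :
    (∃ i ∈ PySem.List.pyRange 0 nr 1, ∃ j ∈ PySem.List.pyRange 0 nc 1,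
        pvAddCond L nr nc i j x) ↔
      ((x.1 ∈ PySem.List.pyRange 0 nr 1) ∧ (x.2 ∈ PySem.List.pyRange 0 nc 1) ∧
       pvCell L x.1 x.2 = 1 ∧ pvNbr L nr nc x.1 x.2 = true) := by
  obtain ⟨a, b⟩ := x
  simp only [PySem.List.mem_pyRange_one, pvAddCond, pvNbr, Bool.or_eq_true, Bool.and_eq_true,
    decide_eq_true_eq, beq_iff_eq, Prod.mk.injEq]
  constructor
  · rintro ⟨i, ⟨hi0, hin⟩, j, ⟨hj0, hjn⟩, hc, ⟨hb, hn, ⟨ha', hb'⟩ | ⟨ha', hb'⟩⟩ |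
      ⟨hb, hn, ⟨ha', hb'⟩ | ⟨ha', hb'⟩⟩⟩ <;>
    subst ha' <;> subst hb' <;>
    refine ⟨⟨by omega, by omega⟩, ⟨by omega, by omega⟩,
      by first | simpa using hc | simpa using hn, ?_⟩ <;>
    first
      | exact Or.inr ⟨by omega, by simpa using hc⟩
      | exact Or.inr ⟨by omega, by simpa using hn⟩
      | exact Or.inl (Or.inr ⟨by omega, by simpa using hc⟩)
      | exact Or.inl (Or.inl (Or.inr ⟨by omega, by simpa using hc⟩))
      | exact Or.inl (Or.inl (Or.inr ⟨by omega, by simpa using hn⟩))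
      | exact Or.inl (Or.inl (Or.inl ⟨by omega, by simpa using hc⟩))
  · rintro ⟨⟨ha0, han⟩, ⟨hb0, hbn⟩, hc, ((hl | hr) | hu) | hd⟩
    · exact ⟨a - 1, ⟨by omega, by omega⟩, b, ⟨hb0, hbn⟩, by simpa using hl.2, Or.inr
        ⟨by omega, by simpa using hc, Or.inr (by constructor <;> omega)⟩⟩
    · exact ⟨a, ⟨ha0, han⟩, b, ⟨hb0, hbn⟩, hc, Or.inr
        ⟨by omega, hr.2, Or.inl ⟨rfl, rfl⟩⟩⟩
    · exact ⟨a, ⟨ha0, han⟩, b - 1, ⟨by omega, by omega⟩, by simpa using hu.2, Or.inl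
        ⟨by omega, by simpa using hc, Or.inr (by constructor <;> omega)⟩⟩
    · exact ⟨a, ⟨ha0, han⟩, b, ⟨hb0, hbn⟩, hc, Or.inl
        ⟨by omega, hd.2, Or.inl ⟨rfl, rfl⟩⟩⟩

theorem main_eq (L : List (List Int)) : check_legal_layout L = check_legal_layout_alt L := by
  rw [a_char]
  simp only [check_legal_layout_alt]
  set nr : Int := (L.length : Int) with hnr
  set nc : Int := ((PySem.List.pyGetD L 0 []).length : Int) with hnc
  set R : List Int := PySem.List.pyRange 0 nr 1 with hR
  set C : List Int := PySem.List.pyRange 0 nc 1 with hC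
  set S : PySem.Set (Int × Int) :=
    (bGrid L nr nc R (PySem.Set.empty, false)).1 with hS
  have hsnd : (bGrid L nr nc R (PySem.Set.empty, false)).2 =
      R.any (fun i => pvRowAny L nc i) := by
    rw [bGrid_snd]; simp
  have hmem : ∀ i j : Int, ((i, j) ∈ S ↔
      (i ∈ R ∧ j ∈ C ∧ pvCell L i j = 1 ∧ pvNbr L nr nc i j = true)) := by
    intro i j
    rw [hS, bGrid_mem]
    constructor
    · rintro (h | h)
      · exact absurd h (List.not_mem_nil)
      · have := (conn_char L nr nc (i, j)).mp (by simpa [hR, hC] using h)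
        simpa [hR, hC] using this
    · intro h
      exact Or.inr ((conn_char L nr nc (i, j)).mpr (by simpa [hR, hC] using h))
  rw [hsnd]
  by_cases hf : R.any (fun i => pvRowAny L nc i) = true
  · rw [hf]
    simp only [Bool.not_true, Bool.and_true]
    rw [if_neg (by simp)]
    have helem : ∀ i ∈ R, ∀ j ∈ C,
        ((pvCell L i j != 1) || PySem.Set.contains S (i, j)) =
        (!(pvCell L i j == 1) || pvNbr L nr nc i j) := by
      intro i hi j hj
      by_cases hcb : (pvCell L i j == 1) = true
      · have hcv : pvCell L i j = 1 := by simpa using hcb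
        by_cases hn : pvNbr L nr nc i j = true
        · have hct : PySem.Set.contains S (i, j) = true :=
            (PySem.Set.contains_iff _ _).mpr ((hmem i j).mpr ⟨hi, hj, hcv, hn⟩)
          rw [hct, hn]
          simp
        · have hnm : (i, j) ∉ S := fun hm => hn ((hmem i j).mp hm).2.2.2
          have hcf : PySem.Set.contains S (i, j) = false := by
            cases hcontains : PySem.Set.contains S (i, j)
            · rfl
            · exact absurd ((PySem.Set.contains_iff _ _).mp hcontains) hnm
          have hnf : pvNbr L nr nc i j = false := by
            simpa [Bool.not_eq_true] using hn
          rw [hcf, hnf]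
          simp [bne]
      · have hcv : ¬ pvCell L i j = 1 := by simpa using hcb
        simp [bne, hcb]
    rw [Bool.eq_iff_iff]
    simp only [pvRowAll, List.all_eq_true]
    rw [← hC]
    constructor <;> intro h i hi j hj
    · rw [helem i hi j hj]
      exact h i hi j hj
    · rw [← helem i hi j hj]
      exact h i hi j hj
  · have hf' : R.any (fun i => pvRowAny L nc i) = false := by
      simpa [Bool.not_eq_true] using hf
    rw [hf']
    simp

theorem check_legal_layout_spec : Claim_equal_check_legal_layout := by
  intro layout _ _
  unfold Spec_check_legal_layout
  exact main_eq layout
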